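-- pv_equiv track=rewrite | github.com/antismash/antismash | antismash/common/utils.py | extract_by_reference_positions
-- ===== SOURCE A (Python) =====
-- from typing import Dict, Iterable, List, Optional
--
-- def extract_by_reference_positions(query: str, reference: str, ref_positions: List[int]) -> Optional[str]:
--     """ Extracts the given positions from a query alignment. The positions are
--         adjusted to account for any gaps in the reference sequence.
--
--         Arguments:
--             query: the aligned query
--             reference: the aligned reference
--             ref_positions: the positions of interest in the unaligned reference
--
--         Returns:
--             a string containing the sequence elements at the adjusted reference
--             positions or None if the reference is too short for some reason
--     """
--     # adjust position of interest to account for gaps in the ref sequence alignment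
--     positions = []
--     position_skipping_gaps = 0
--     for i, amino in enumerate(reference):
--         if amino in "-.":
--             continue
--         if position_skipping_gaps in ref_positions:
--             positions.append(i)
--         position_skipping_gaps += 1
--     if len(positions) != len(ref_positions):
--         return None
--     # extract positions from query sequence
--     return "".join([query[i] for i in positions])
-- ===== SOURCE B (Python) =====
-- def extract_by_reference_positions(query, reference, ref_positions):
--     # Staged: (1) list the alignment columns of the non-gap residues,
--     # (2) dedupe+sort the wanted ungapped positions, (3) validate and index directly.
--     residues = [i for i, ch in enumerate(reference) if ch not in "-."]
--     wanted = sorted(set(ref_positions))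
--     if len(wanted) != len(ref_positions) or any(p < 0 or p >= len(residues) for p in wanted):
--         return None
--     return "".join(query[residues[p]] for p in wanted)
-- ===== Notes on version B (the rewrite author's own statement) =====
-- stated objective: faster
-- what changed: Replaces A's single loop with a per-residue linear membership scan of ref_positions by staged passes: a residue-column list built once, sorted(set(ref_positions)), an explicit range/duplicate validity check, then direct list indexing.
import Mathlib
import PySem

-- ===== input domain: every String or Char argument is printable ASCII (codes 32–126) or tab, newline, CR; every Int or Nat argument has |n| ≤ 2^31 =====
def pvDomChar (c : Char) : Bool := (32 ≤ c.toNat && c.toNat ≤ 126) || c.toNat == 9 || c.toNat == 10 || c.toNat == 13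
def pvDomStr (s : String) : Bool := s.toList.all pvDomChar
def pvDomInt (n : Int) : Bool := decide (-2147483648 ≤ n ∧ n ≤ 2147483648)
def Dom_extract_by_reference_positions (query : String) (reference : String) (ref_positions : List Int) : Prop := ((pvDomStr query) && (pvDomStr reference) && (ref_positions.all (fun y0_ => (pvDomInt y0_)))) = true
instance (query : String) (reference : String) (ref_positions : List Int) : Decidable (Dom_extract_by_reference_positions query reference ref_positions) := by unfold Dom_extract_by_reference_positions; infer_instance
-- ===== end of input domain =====

-- B replaces A's per-residue membership scan of ref_positions by staged passes:
-- a residue-column list, sorted(set(ref_positions)), a validity check, then direct indexing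
-- (objective: faster mechanism, same values).

-- ===== PORT A =====
-- 'amino in "-."' for a single char is exactly amino = '-' or amino = '.';
-- query[i] (i ≥ 0 here) is PySem.Str.pyGet?; the .getD ' ' default is unreachable under Pre_
-- (Pre_ excludes exactly the inputs where Python raises IndexError there).
def extract_by_reference_positions (query : String) (reference : String) (ref_positions : List Int) : Option String :=
  let st := (PySem.List.enumerate reference.toList 0).foldl
    (fun (st : List Int × Int) ia =>
      if ia.2 == '-' || ia.2 == '.' then st
      else ((if st.2 ∈ ref_positions then st.1 ++ [ia.1] else st.1), st.2 + 1))
    ([], 0)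
  if st.1.length ≠ ref_positions.length then none
  else some (String.ofList (st.1.map (fun i => (PySem.Str.pyGet? query i).getD ' ')))

-- ===== PORT B =====
-- residues is the comprehension '[i for i, ch in enumerate(reference) if ch not in "-."]';
-- wanted is 'sorted(set(ref_positions))'; residues[p] (0 ≤ p < len checked by the guard)
-- is PySem.List.pyGetD; query[residues[p]] is PySem.Str.pyGet?, its .getD ' ' default
-- unreachable under Pre_ exactly as in A's port.
def extract_by_reference_positions_alt (query : String) (reference : String) (ref_positions : List Int) : Option String :=
  let residues : List Int :=
    ((PySem.List.enumerate reference.toList 0).filter (fun ia => !(ia.2 == '-' || ia.2 == '.'))).map (·.1)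
  let wanted := PySem.List.sorted (PySem.Set.ofList ref_positions) (fun x => x) false
  if wanted.length ≠ ref_positions.length
      ∨ wanted.any (fun p => decide (p < 0) || decide ((residues.length : Int) ≤ p)) then none
  else some (String.ofList (wanted.map
    (fun p => (PySem.Str.pyGet? query (PySem.List.pyGetD residues p 0)).getD ' ')))

-- ===== PRECONDITION & SPEC =====
-- indices (0-based alignment columns) of the non-gap residues of the reference
def pvNg (reference : String) : List Nat :=
  ((reference.toList.zipIdx).filter (fun q => !(q.1 == '-' || q.1 == '.'))).map (·.2)

-- Pre_ excludes exactly the inputs on which Python A raises IndexError: those where every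
-- wanted position is found (ref_positions duplicate-free and all within the ungapped
-- reference) yet some selected alignment column falls beyond the end of query.
def Pre_extract_by_reference_positions (query : String) (reference : String) (ref_positions : List Int) : Prop :=
  (ref_positions.Nodup ∧ ∀ p ∈ ref_positions, 0 ≤ p ∧ p.toNat < (pvNg reference).length) →
    ∀ p ∈ ref_positions, (pvNg reference).getD p.toNat 0 < query.toList.length
instance (query : String) (reference : String) (ref_positions : List Int) : Decidable (Pre_extract_by_reference_positions query reference ref_positions) := by unfold Pre_extract_by_reference_positions; infer_instance

def pvWitness_extract_by_reference_positions : String × String × List Int := ("ABC", "A-B", [0, 1])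

def Spec_extract_by_reference_positions (query : String) (reference : String) (ref_positions : List Int) (out : Option String) : Prop := out = extract_by_reference_positions_alt query reference ref_positions
instance (query : String) (reference : String) (ref_positions : List Int) (out : Option String) : Decidable (Spec_extract_by_reference_positions query reference ref_positions out) := by unfold Spec_extract_by_reference_positions; infer_instance

-- ===== CLAIM (what is proved, stated in full; the proofs are below) =====
def Claim_equal_extract_by_reference_positions : Prop := ∀ (query : String) (reference : String) (ref_positions : List Int), Dom_extract_by_reference_positions query reference ref_positions → Pre_extract_by_reference_positions query reference ref_positions → Spec_extract_by_reference_positions query reference ref_positions (extract_by_reference_positions query reference ref_positions)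

-- ===== LEMMAS AND PROOFS =====

-- the (Int) alignment indices of the non-gap residues of l, enumerated from s
def pvNgIdxs : List Char → Int → List Int
  | [], _ => []
  | ch :: t, s => if ch == '-' || ch == '.' then pvNgIdxs t (s + 1) else s :: pvNgIdxs t (s + 1)

-- what A's loop appends: the entries of ng whose running counter (from c) lies in rp
def pvSelA (rp : List Int) : List Int → Int → List Int
  | [], _ => []
  | i :: t, c => if c ∈ rp then i :: pvSelA rp t (c + 1) else pvSelA rp t (c + 1)

theorem pvFoldA_eq (rp : List Int) (l : List Char) (s : Int) (acc : List Int) (c : Int) :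
    (PySem.List.enumerate l s).foldl
      (fun (st : List Int × Int) ia =>
        if ia.2 == '-' || ia.2 == '.' then st
        else ((if st.2 ∈ rp then st.1 ++ [ia.1] else st.1), st.2 + 1))
      (acc, c)
    = (acc ++ pvSelA rp (pvNgIdxs l s) c, c + (pvNgIdxs l s).length) := by
  induction l generalizing s acc c with
  | nil => simp [PySem.List.enumerate_nil, pvNgIdxs, pvSelA]
  | cons ch t ih =>
    rw [PySem.List.enumerate_cons, List.foldl_cons]
    by_cases hg : (ch == '-' || ch == '.') = true
    · rw [if_pos hg, ih]
      simp only [pvNgIdxs, hg, if_true]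
    · rw [if_neg (by simp [hg]), ih]
      simp only [pvNgIdxs, hg, Bool.false_eq_true, if_false]
      by_cases hc : c ∈ rp
      · rw [if_pos hc]
        simp only [pvSelA, hc, if_true, Prod.mk.injEq, List.length_cons]
        refine ⟨by simp [List.append_assoc], by omega⟩
      · rw [if_neg hc]
        simp only [pvSelA, hc, if_false, Prod.mk.injEq, List.length_cons]
        exact ⟨trivial, by omega⟩

-- B's residue-column comprehension computes the same index list
theorem pvResidues_eq (l : List Char) (s : Int) :
    ((PySem.List.enumerate l s).filter (fun ia => !(ia.2 == '-' || ia.2 == '.'))).map (·.1)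
      = pvNgIdxs l s := by
  induction l generalizing s with
  | nil => simp [PySem.List.enumerate_nil, pvNgIdxs]
  | cons ch t ih =>
    rw [PySem.List.enumerate_cons, List.filter_cons]
    by_cases hg : (ch == '-' || ch == '.') = true
    · rw [if_neg (by simp [hg])]
      simp only [pvNgIdxs, hg, if_true]
      exact ih (s + 1)
    · rw [if_pos (by simp [hg])]
      simp only [pvNgIdxs, hg, Bool.false_eq_true, if_false, List.map_cons]
      rw [ih (s + 1)]

theorem pvSelA_eq (rp ng : List Int) (c : Int) :
    pvSelA rp ng c =
      ((PySem.List.pyRange c (c + ng.length) 1).filter (fun p => decide (p ∈ rp))).map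
        (fun p => PySem.List.pyGetD ng (p - c) 0) := by
  induction ng generalizing c with
  | nil => simp [pvSelA]
  | cons i t ih =>
    have h0 : (0 : Int) ≤ t.length := by positivity
    have hlen : c + ((i :: t).length : Int) = c + 1 + t.length := by simp only [List.length_cons]; push_cast; omega
    have hr : PySem.List.pyRange c (c + 1 + (t.length : Int)) 1
        = c :: PySem.List.pyRange (c + 1) (c + 1 + (t.length : Int)) 1 :=
      PySem.List.pyRange_one_cons (by omega)
    rw [hlen, hr, List.filter_cons]
    have hmap : ∀ p ∈ (PySem.List.pyRange (c + 1) (c + 1 + (t.length : Int)) 1).filter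
        (fun p => decide (p ∈ rp)),
        PySem.List.pyGetD (i :: t) (p - c) 0 = PySem.List.pyGetD t (p - (c + 1)) 0 := by
      intro p hp
      have hp' : c + 1 ≤ p := by
        have := (List.mem_filter.mp hp).1
        exact (PySem.List.mem_pyRange_one.mp this).1
      rw [PySem.List.pyGetD_of_nonneg _ 0 (by omega), PySem.List.pyGetD_of_nonneg _ 0 (by omega)]
      have : (p - c).toNat = (p - (c + 1)).toNat + 1 := by omega
      rw [this]
      simp [List.getD]
    by_cases hc : c ∈ rp
    · rw [if_pos (decide_eq_true hc), List.map_cons]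
      simp only [pvSelA, hc, if_true]
      congr 1
      · rw [PySem.List.pyGetD_of_nonneg _ 0 (by omega)]
        simp [List.getD]
      · rw [ih]
        exact (List.map_congr_left hmap).symm
    · rw [if_neg (by simp [hc])]
      simp only [pvSelA, hc, if_false]
      rw [ih]
      exact (List.map_congr_left hmap).symm

theorem pvKeys_eq (rp : List Int) (R : Nat) :
    ((PySem.List.sorted (PySem.Set.ofList rp) (fun x => x) false).filter
        (fun p => decide (0 ≤ p ∧ p < (R : Int)))) =
      ((PySem.List.pyRange 0 (R : Int) 1).filter (fun p => decide (p ∈ rp))) := by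
  have hS : (PySem.List.sorted (PySem.Set.ofList rp) (fun x => x) false).Pairwise (· < ·) :=
    PySem.List.sorted_ofList_pairwise_lt rp
  have hL := hS.filter (fun p => decide (0 ≤ p ∧ p < (R : Int)))
  have hR := (PySem.List.pairwise_lt_pyRange_one 0 (R : Int)).filter (fun p => decide (p ∈ rp))
  have ndL : ((PySem.List.sorted (PySem.Set.ofList rp) (fun x => x) false).filter
      (fun p => decide (0 ≤ p ∧ p < (R : Int)))).Nodup := hL.imp (fun h => ne_of_lt h)
  have ndR : ((PySem.List.pyRange 0 (R : Int) 1).filter (fun p => decide (p ∈ rp))).Nodup :=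
    hR.imp (fun h => ne_of_lt h)
  have hperm := (List.perm_ext_iff_of_nodup ndL ndR).mpr (by
    intro a
    simp only [List.mem_filter, PySem.List.mem_sorted, PySem.Set.mem_ofList,
      PySem.List.mem_pyRange_one, decide_eq_true_eq]
    tauto)
  exact List.Perm.eq_of_pairwise
    (fun a b _ _ h1 h2 => le_antisymm h1 h2)
    (hL.imp le_of_lt) (hR.imp le_of_lt) hperm

-- A's selection equals B's in-range filter of sorted(set(rp)), looked up by direct index
theorem pvSel_filter (rp ng : List Int) :
    pvSelA rp ng 0 =
      ((PySem.List.sorted (PySem.Set.ofList rp) (fun x => x) false).filter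
          (fun p => decide (0 ≤ p ∧ p < (ng.length : Int)))).map
        (fun p => PySem.List.pyGetD ng p 0) := by
  rw [pvSelA_eq rp ng 0]
  simp only [zero_add, sub_zero]
  rw [← pvKeys_eq rp ng.length]

-- the length-match test of A holds exactly when B's validity guard passes
theorem pvGuard_iff (rp ng : List Int) :
    (pvSelA rp ng 0).length = rp.length ↔
      ((PySem.List.sorted (PySem.Set.ofList rp) (fun x => x) false).length = rp.length ∧
       (PySem.List.sorted (PySem.Set.ofList rp) (fun x => x) false).any
         (fun p => decide (p < 0) || decide ((ng.length : Int) ≤ p)) = false) := by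
  rw [pvSel_filter rp ng, List.length_map]
  have hle2 : (PySem.List.sorted (PySem.Set.ofList rp) (fun x => x) false).length ≤ rp.length := by
    rw [PySem.List.length_sorted]; exact PySem.Set.length_ofList_le rp
  constructor
  · intro h
    have hfle := List.length_filter_le (fun p => decide (0 ≤ p ∧ p < (ng.length : Int)))
      (PySem.List.sorted (PySem.Set.ofList rp) (fun x => x) false)
    have hflen : ((PySem.List.sorted (PySem.Set.ofList rp) (fun x => x) false).filter
        (fun p => decide (0 ≤ p ∧ p < (ng.length : Int)))).length
        = (PySem.List.sorted (PySem.Set.ofList rp) (fun x => x) false).length := by omega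
    have hall := List.length_filter_eq_length_iff.mp hflen
    refine ⟨by omega, ?_⟩
    simp only [List.any_eq_false]
    intro p hp
    have := hall p hp
    simp only [decide_eq_true_eq] at this
    simp
    omega
  · rintro ⟨h1, h2⟩
    simp only [List.any_eq_false] at h2
    have hfe : (PySem.List.sorted (PySem.Set.ofList rp) (fun x => x) false).filter
        (fun p => decide (0 ≤ p ∧ p < (ng.length : Int)))
        = PySem.List.sorted (PySem.Set.ofList rp) (fun x => x) false := by
      apply List.filter_eq_self.mpr
      intro p hp
      have := h2 p hp
      simp at this
      simp only [decide_eq_true_eq]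
      omega
    rw [hfe]
    exact h1

-- ===== VERDICT (by name: the statement is the Claim_ definition above) =====
theorem extract_by_reference_positions_spec : Claim_equal_extract_by_reference_positions := by
  unfold Claim_equal_extract_by_reference_positions
  intro query reference ref_positions _ _
  unfold Spec_extract_by_reference_positions
  unfold extract_by_reference_positions extract_by_reference_positions_alt
  simp only [pvFoldA_eq ref_positions reference.toList 0 [] 0, List.nil_append,
    pvResidues_eq reference.toList 0]
  by_cases hG : (pvSelA ref_positions (pvNgIdxs reference.toList 0) 0).length
      = ref_positions.length
  · obtain ⟨h1, h2⟩ := (pvGuard_iff ref_positions (pvNgIdxs reference.toList 0)).mp hG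
    rw [if_neg (by simpa using hG), if_neg (by rw [h2]; simp [h1])]
    have hall : ∀ p ∈ PySem.List.sorted (PySem.Set.ofList ref_positions) (fun x => x) false,
        decide (0 ≤ p ∧ p < ((pvNgIdxs reference.toList 0).length : Int)) = true := by
      simp only [List.any_eq_false] at h2
      intro p hp
      have := h2 p hp
      simp at this
      simp only [decide_eq_true_eq]
      omega
    rw [pvSel_filter ref_positions (pvNgIdxs reference.toList 0),
      List.filter_eq_self.mpr hall, List.map_map]
    rfl
  · have hcond : (PySem.List.sorted (PySem.Set.ofList ref_positions) (fun x => x) false).length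
        ≠ ref_positions.length ∨
        ((PySem.List.sorted (PySem.Set.ofList ref_positions) (fun x => x) false).any
          (fun p => decide (p < 0) ||
            decide (((pvNgIdxs reference.toList 0).length : Int) ≤ p))) = true := by
      by_cases h1 : (PySem.List.sorted (PySem.Set.ofList ref_positions) (fun x => x) false).length
          = ref_positions.length
      · by_cases h2 : ((PySem.List.sorted (PySem.Set.ofList ref_positions) (fun x => x) false).any
            (fun p => decide (p < 0) ||
              decide (((pvNgIdxs reference.toList 0).length : Int) ≤ p))) = true
        · exact Or.inr h2
        · exact absurd ((pvGuard_iff ref_positions (pvNgIdxs reference.toList 0)).mpr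
            ⟨h1, by simpa using h2⟩) hG
      · exact Or.inl h1
    rw [if_pos (by simpa using hG), if_pos hcond]
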